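-- pv_equiv track=rewrite | github.com/george-bobby/app-opencats | src/apps/gitlab/core/comprehensive_importer.py | _find_matching_github_pr
-- ===== SOURCE A (Python) =====
-- def _find_matching_github_pr(gitlab_mr, github_prs):
--     """Find matching GitHub PR based on title and content"""
--     gitlab_title = gitlab_mr.get("title", "").strip()
--     if not gitlab_title:
--         return None
--
--     # Try exact title match first
--     for gh_pr in github_prs:
--         if gh_pr.get("title", "").strip() == gitlab_title:
--             return gh_pr
--
--     # Try partial title match
--     for gh_pr in github_prs:
--         gh_title = gh_pr.get("title", "").strip()
--         if gitlab_title in gh_title or gh_title in gitlab_title: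
--             return gh_pr
--
--     return None
-- ===== SOURCE B (Python) =====
-- def _find_matching_github_pr(gitlab_mr, github_prs):
--     """Single pass: return on first exact title match; remember the first
--     partial match as a fallback returned after the scan."""
--     gitlab_title = gitlab_mr.get("title", "").strip()
--     if not gitlab_title:
--         return None
--     partial = None
--     for gh_pr in github_prs:
--         gh_title = gh_pr.get("title", "").strip()
--         if gh_title == gitlab_title:
--             return gh_pr
--         if partial is None and (gitlab_title in gh_title or gh_title in gitlab_title):
--             partial = gh_pr
--     return partial
-- ===== Notes on version B (the rewrite author's own statement) =====
-- stated objective: alternative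
-- what changed: Collapsed A's two scans over github_prs into one pass that returns on the first exact match and carries the first partial match as a fallback, stripping each title once instead of twice.
import Mathlib
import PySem

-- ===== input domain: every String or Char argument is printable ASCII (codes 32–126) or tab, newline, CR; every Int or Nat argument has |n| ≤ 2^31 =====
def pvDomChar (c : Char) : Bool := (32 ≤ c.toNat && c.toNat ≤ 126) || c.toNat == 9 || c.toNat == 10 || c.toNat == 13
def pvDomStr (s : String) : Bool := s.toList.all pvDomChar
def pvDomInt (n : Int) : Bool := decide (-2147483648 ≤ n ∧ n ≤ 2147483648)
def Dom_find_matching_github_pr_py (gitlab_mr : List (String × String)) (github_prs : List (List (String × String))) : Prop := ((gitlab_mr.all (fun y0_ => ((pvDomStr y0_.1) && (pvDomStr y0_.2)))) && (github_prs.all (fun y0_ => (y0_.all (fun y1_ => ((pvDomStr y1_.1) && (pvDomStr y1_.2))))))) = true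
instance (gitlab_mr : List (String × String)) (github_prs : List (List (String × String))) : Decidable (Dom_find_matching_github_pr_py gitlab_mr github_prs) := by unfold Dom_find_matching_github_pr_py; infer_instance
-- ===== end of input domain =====

-- B collapses A's two scans into one pass (first exact match wins, first partial match kept as fallback); same return value, no side effects.

-- ===== PORT A =====
-- gh_pr.get("title", "").strip() (first-match dict lookup, then strip)
def pvTitleOf (pr : List (String × String)) : String :=
  PySem.Str.strip ((PySem.Dict.mk pr).getD "title" "")

def find_matching_github_pr_py (gitlab_mr : List (String × String)) (github_prs : List (List (String × String))) : Option (List (String × String)) :=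
  let gitlab_title := pvTitleOf gitlab_mr
  if gitlab_title = "" then none
  else
    -- first loop: exact title match (for-loop with early return = find?)
    match github_prs.find? (fun gh_pr => pvTitleOf gh_pr == gitlab_title) with
    | some gh_pr => some gh_pr
    | none =>
      -- second loop: partial title match
      github_prs.find? (fun gh_pr =>
        let gh_title := pvTitleOf gh_pr
        PySem.Str.isIn gitlab_title gh_title || PySem.Str.isIn gh_title gitlab_title)

-- ===== PORT B =====
-- single pass carrying the first partial-match candidate
def pvAltLoop (t : String) (prs : List (List (String × String))) (partial_ : Option (List (String × String))) : Option (List (String × String)) :=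
  match prs with
  | [] => partial_
  | gh_pr :: rest =>
    let gh_title := pvTitleOf gh_pr
    if gh_title == t then some gh_pr
    else pvAltLoop t rest
      (if partial_.isNone && (PySem.Str.isIn t gh_title || PySem.Str.isIn gh_title t) then some gh_pr else partial_)

def find_matching_github_pr_py_alt (gitlab_mr : List (String × String)) (github_prs : List (List (String × String))) : Option (List (String × String)) :=
  let gitlab_title := pvTitleOf gitlab_mr
  if gitlab_title = "" then none
  else pvAltLoop gitlab_title github_prs none

-- ===== PRECONDITION & SPEC =====
def Spec_find_matching_github_pr_py (gitlab_mr : List (String × String)) (github_prs : List (List (String × String))) (out : Option (List (String × String))) : Prop := out = find_matching_github_pr_py_alt gitlab_mr github_prs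
instance (gitlab_mr : List (String × String)) (github_prs : List (List (String × String))) (out : Option (List (String × String))) : Decidable (Spec_find_matching_github_pr_py gitlab_mr github_prs out) := by unfold Spec_find_matching_github_pr_py; infer_instance

-- ===== CLAIM =====
def Claim_equal_find_matching_github_pr_py : Prop := ∀ (gitlab_mr : List (String × String)) (github_prs : List (List (String × String))), Dom_find_matching_github_pr_py gitlab_mr github_prs → Spec_find_matching_github_pr_py gitlab_mr github_prs (find_matching_github_pr_py gitlab_mr github_prs)

-- ===== LEMMAS AND PROOFS =====

-- loop invariant: B's single pass equals "exact find?, else candidate, else partial find?"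
theorem pvAltLoop_eq (t : String) (prs : List (List (String × String))) (cand : Option (List (String × String))) :
    pvAltLoop t prs cand =
      match prs.find? (fun gh_pr => pvTitleOf gh_pr == t) with
      | some p => some p
      | none =>
        match cand with
        | some c => some c
        | none => prs.find? (fun gh_pr =>
            PySem.Str.isIn t (pvTitleOf gh_pr) || PySem.Str.isIn (pvTitleOf gh_pr) t)
      := by
  induction prs generalizing cand with
  | nil => cases cand <;> simp [pvAltLoop]
  | cons pr rest ih =>
    simp only [pvAltLoop, List.find?]
    by_cases hx : pvTitleOf pr == t
    · simp [hx]
    · simp only [hx, Bool.false_eq_true, ite_false]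
      rw [ih]
      cases cand with
      | some c => simp
      | none =>
        simp only [Option.isNone_none, Bool.true_and]
        by_cases hp : (PySem.Str.isIn t (pvTitleOf pr) || PySem.Str.isIn (pvTitleOf pr) t) = true
        · rw [if_pos hp, hp]
        · simp only [Bool.not_eq_true] at hp
          rw [if_neg (by rw [hp]; simp), hp]

-- ===== VERDICT =====
theorem find_matching_github_pr_py_spec : Claim_equal_find_matching_github_pr_py := by
  intro gitlab_mr github_prs _
  unfold Spec_find_matching_github_pr_py find_matching_github_pr_py find_matching_github_pr_py_alt
  by_cases h : pvTitleOf gitlab_mr = ""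
  · simp [h]
  · simp only [h, ite_false]
    rw [pvAltLoop_eq]
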